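-- pv_equiv track=rewrite | github.com/casePloeg/kattis | riot.py | count_flowers
-- ===== SOURCE A (Python) =====
-- def count_flowers(i, j, garden):
--     h = len(garden)
--     w = len(garden[0])
--     count = 0
--     row = garden[i]
--     col = [row[j] for row in garden]
--     for z in range(j-1, -1, -1):
--         if garden[i][z] == 'F':
--             count += 1
--         elif garden[i][z] == 'W':
--             break
--     for z in range(i-1, -1, -1):
--         if garden[z][j] == 'F':
--             count += 1
--         elif garden[z][j] == 'W':
--             break
--     for z in range(j+1, w):
--         if garden[i][z] == 'F':
--             count += 1
--         elif garden[i][z] == 'W':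
--             break
--     for z in range(i+1, h):
--         if garden[z][j] == 'F':
--             count += 1
--         elif garden[z][j] == 'W':
--             break
--     return count
-- ===== SOURCE B (Python) =====
-- def count_flowers(i, j, garden):
--     h, w = len(garden), len(garden[0])
--
--     def at(r, z):
--         # bounds-safe cell lookup (Python negative-index semantics, '' when absent)
--         return r[z] if -len(r) <= z < len(r) else ''
--
--     row = garden[i]
--     col = [r[j] for r in garden]
--
--     def flowers(cells):
--         # count flowers in the ray segment before its first wall
--         if 'W' in cells:
--             cells = cells[:cells.index('W')]
--         return cells.count('F')
--
--     return (flowers([at(row, z) for z in range(j - 1, -1, -1)])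
--           + flowers([at(row, z) for z in range(j + 1, w)])
--           + flowers([at(col, z) for z in range(i - 1, -1, -1)])
--           + flowers([at(col, z) for z in range(i + 1, h)]))
-- ===== Notes on version B (the rewrite author's own statement) =====
-- stated objective: alternative
-- what changed: Replaces A's four fused scan-with-break loops over a shared mutable counter by a gather/truncate/count pipeline: each ray is materialized as a list of cells, cut at its first wall with index(), and its flowers counted with count().
import Mathlib
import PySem

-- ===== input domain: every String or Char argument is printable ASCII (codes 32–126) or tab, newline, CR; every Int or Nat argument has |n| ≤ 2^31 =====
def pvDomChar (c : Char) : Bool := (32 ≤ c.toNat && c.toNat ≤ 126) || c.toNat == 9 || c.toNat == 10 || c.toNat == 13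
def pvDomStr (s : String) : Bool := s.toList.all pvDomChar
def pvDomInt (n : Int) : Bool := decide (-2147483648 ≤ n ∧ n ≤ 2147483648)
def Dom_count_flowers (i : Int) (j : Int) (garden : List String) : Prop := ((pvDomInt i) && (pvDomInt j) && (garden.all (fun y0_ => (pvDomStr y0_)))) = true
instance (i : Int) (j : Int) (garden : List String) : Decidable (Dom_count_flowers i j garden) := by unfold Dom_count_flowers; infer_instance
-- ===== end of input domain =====

-- B replaces A's four fused scan-with-break loops by a gather/truncate/count
-- pipeline (materialize each ray, cut at its first wall, count 'F'); same cost.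

-- ===== PORT A =====
-- garden[x][z] as a Char via pyGetD; under Pre_ the default is never read before
-- the scan that reads it has already stopped at a wall, so it never affects the count
def pvCell (garden : List String) (x z : Int) : Char :=
  PySem.List.pyGetD (PySem.List.pyGetD garden x "").toList z ' '

-- one of A's four 'for z in range(…): if F: count += 1 elif W: break' loops
def pvLoopA (get : Int → Char) : List Int → Int → Int
  | [], c => c
  | z :: zs, c =>
    if get z = 'F' then pvLoopA get zs (c + 1)
    else if get z = 'W' then c
    else pvLoopA get zs c

-- A's unused 'row'/'col' bindings only affect raising (excluded by Pre_) and are dropped.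
def count_flowers (i : Int) (j : Int) (garden : List String) : Int :=
  let h : Int := garden.length
  let w : Int := (PySem.List.pyGetD garden 0 "").toList.length
  let c1 := pvLoopA (fun z => pvCell garden i z) (PySem.List.pyRange (j - 1) (-1) (-1)) 0
  let c2 := pvLoopA (fun z => pvCell garden z j) (PySem.List.pyRange (i - 1) (-1) (-1)) c1
  let c3 := pvLoopA (fun z => pvCell garden i z) (PySem.List.pyRange (j + 1) w 1) c2
  let c4 := pvLoopA (fun z => pvCell garden z j) (PySem.List.pyRange (i + 1) h 1) c3
  c4

-- ===== PORT B =====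
-- Source B's at(r, z): bounds-safe lookup; Python's '' sentinel is ported as none
def pvAt (r : List Char) (z : Int) : Option Char :=
  if -(r.length : Int) ≤ z ∧ z < (r.length : Int) then PySem.List.pyGet? r z else none

-- Source B's flowers(cells): cut the ray at its first wall, then count the flowers
def pvFlowers (cells : List (Option Char)) : Int :=
  let seg := match PySem.List.index? cells (some 'W') with
    | some k => cells.take k
    | none => cells
  (PySem.List.count seg (some 'F') : Int)

def count_flowers_alt (i : Int) (j : Int) (garden : List String) : Int :=
  let h : Int := garden.length
  let w : Int := (PySem.List.pyGetD garden 0 "").toList.length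
  let row := (PySem.List.pyGetD garden i "").toList
  let col := garden.map (fun r => PySem.List.pyGetD r.toList j ' ')
  pvFlowers ((PySem.List.pyRange (j - 1) (-1) (-1)).map (pvAt row))
    + pvFlowers ((PySem.List.pyRange (j + 1) w 1).map (pvAt row))
    + pvFlowers ((PySem.List.pyRange (i - 1) (-1) (-1)).map (pvAt col))
    + pvFlowers ((PySem.List.pyRange (i + 1) h 1).map (pvAt col))

-- ===== PRECONDITION & SPEC =====
-- Pre_ is exactly the inputs on which A returns (elsewhere it raises IndexError):
-- i a valid (possibly negative) row index, j a valid index into every row, and the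
-- rightward scan of row i stops — row i reaches width w, or a wall sits at one of
-- the scanned positions j+1 … len(row i)-1 — before it runs past the end of row i.
def Pre_count_flowers (i : Int) (j : Int) (garden : List String) : Prop :=
  -(garden.length : Int) ≤ i ∧ i < (garden.length : Int) ∧
  (∀ s ∈ garden, -(s.toList.length : Int) ≤ j ∧ j < (s.toList.length : Int)) ∧
  (((PySem.List.pyGetD garden 0 "").toList.length : Int)
      ≤ ((PySem.List.pyGetD garden i "").toList.length : Int) ∨
   ∃ z ∈ PySem.List.pyRange (j + 1) ((PySem.List.pyGetD garden i "").toList.length : Int) 1,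
     PySem.List.pyGet? (PySem.List.pyGetD garden i "").toList z = some 'W')

instance (i : Int) (j : Int) (garden : List String) : Decidable (Pre_count_flowers i j garden) := by
  unfold Pre_count_flowers; infer_instance

def pvWitness_count_flowers : Int × Int × List String := (1, 1, ["F.F", "WFW", ".F."])

def Spec_count_flowers (i : Int) (j : Int) (garden : List String) (out : Int) : Prop := out = count_flowers_alt i j garden
instance (i : Int) (j : Int) (garden : List String) (out : Int) : Decidable (Spec_count_flowers i j garden out) := by unfold Spec_count_flowers; infer_instance

-- ===== CLAIM (what is proved, stated in full; the proofs are below) =====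
def Claim_equal_count_flowers : Prop := ∀ (i : Int) (j : Int) (garden : List String), Dom_count_flowers i j garden → Pre_count_flowers i j garden → Spec_count_flowers i j garden (count_flowers i j garden)

-- ===== LEMMAS AND PROOFS =====

lemma pvLoopA_shift (get : Int → Char) (l : List Int) (c : Int) :
    pvLoopA get l c = c + pvLoopA get l 0 := by
  induction l generalizing c with
  | nil => simp [pvLoopA]
  | cons z zs ih =>
    by_cases hF : get z = 'F'
    · simp [pvLoopA, hF]; rw [ih, ih 1]; ring
    · by_cases hW : get z = 'W'
      · simp [pvLoopA, hW]
      · simp [pvLoopA, hF, hW]; exact ih c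

lemma pvFlowers_cons_wall (cs : List (Option Char)) :
    pvFlowers (some 'W' :: cs) = 0 := by
  simp [pvFlowers, PySem.List.count_eq]

lemma pvFlowers_cons (c : Option Char) (cs : List (Option Char)) (h : c ≠ some 'W') :
    pvFlowers (c :: cs) = (if c = some 'F' then 1 else 0) + pvFlowers cs := by
  simp only [pvFlowers, PySem.List.index?_cons_of_ne cs h, PySem.List.count_eq]
  cases hk : PySem.List.index? cs (some 'W') with
  | none =>
    simp only [Option.map_none, List.count_cons]
    by_cases hF : c = some 'F' <;> simp [hF] <;> omega
  | some k =>
    simp only [Option.map_some, List.take_succ_cons, List.count_cons]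
    by_cases hF : c = some 'F' <;> simp [hF] <;> omega

-- the B-side pipeline on a ray equals the A-side fused loop, whenever the two
-- cell accessors agree on which scanned cells are walls and which are flowers
lemma pvFlowers_eq_loopA (getA : Int → Char) (getB : Int → Option Char) (l : List Int)
    (hrel : ∀ z, (getB z = some 'W' ↔ getA z = 'W') ∧ (getB z = some 'F' ↔ getA z = 'F')) :
    pvFlowers (l.map getB) = pvLoopA getA l 0 := by
  induction l with
  | nil => simp [pvFlowers, PySem.List.count_eq, pvLoopA]
  | cons z zs ih =>
    have hz := hrel z
    by_cases hW : getA z = 'W'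
    · rw [List.map_cons, hz.1.mpr hW, pvFlowers_cons_wall]
      have hF : ¬ getA z = 'F' := by rw [hW]; decide
      simp [pvLoopA, hW]
    · have hBW : getB z ≠ some 'W' := fun e => hW (hz.1.mp e)
      rw [List.map_cons, pvFlowers_cons _ _ hBW, ih]
      by_cases hF : getA z = 'F'
      · have hBF := hz.2.mpr hF
        simp [pvLoopA, hF, hBF, pvLoopA_shift getA zs 1]
      · have hBF : getB z ≠ some 'F' := fun e => hF (hz.2.mp e)
        simp [pvLoopA, hF, hW, hBF]

-- Source B's bounds guard is redundant over pyGet?: out of bounds it is already none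
lemma pvAt_eq_pyGet? (r : List Char) (z : Int) :
    pvAt r z = PySem.List.pyGet? r z := by
  unfold pvAt
  split
  · rfl
  · rename_i hn
    exact ((PySem.List.pyGet?_eq_none_iff r z).2 (by unfold PySem.Raise.InRange; omega)).symm

-- pyGet? (some/none) versus pyGetD with a default that is neither wall nor flower
lemma pvGet_rel (r : List Char) (z : Int) (c : Char) (hc : c ≠ ' ') :
    PySem.List.pyGet? r z = some c ↔ PySem.List.pyGetD r z ' ' = c := by
  unfold PySem.List.pyGetD
  cases PySem.List.pyGet? r z with
  | none => simp [Ne.symm hc]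
  | some x => simp

-- the two row accessors agree everywhere: same list, default ' ' versus none
lemma pvAt_row_rel (garden : List String) (i z : Int) :
    (pvAt (PySem.List.pyGetD garden i "").toList z = some 'W'
        ↔ pvCell garden i z = 'W')
      ∧ (pvAt (PySem.List.pyGetD garden i "").toList z = some 'F'
        ↔ pvCell garden i z = 'F') := by
  rw [pvAt_eq_pyGet?]
  exact ⟨pvGet_rel _ _ _ (by decide), pvGet_rel _ _ _ (by decide)⟩

lemma pvGet_map (garden : List String) (j z : Int) :
    PySem.List.pyGet? (garden.map (fun r => PySem.List.pyGetD r.toList j ' ')) z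
      = Option.map (fun r => PySem.List.pyGetD r.toList j ' ')
          (PySem.List.pyGet? garden z) := by
  simp [PySem.List.pyGet?]

-- the two column accessors agree everywhere
lemma pvAt_col_rel (garden : List String) (j z : Int) :
    (pvAt (garden.map (fun r => PySem.List.pyGetD r.toList j ' ')) z = some 'W'
        ↔ pvCell garden z j = 'W')
      ∧ (pvAt (garden.map (fun r => PySem.List.pyGetD r.toList j ' ')) z = some 'F'
        ↔ pvCell garden z j = 'F') := by
  rw [pvAt_eq_pyGet?, pvGet_map]
  unfold pvCell
  cases hg : PySem.List.pyGet? garden z with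
  | none =>
    have : PySem.List.pyGetD garden z "" = "" := by
      unfold PySem.List.pyGetD; rw [hg]; rfl
    rw [this]
    constructor <;> constructor <;> intro hx <;> simp_all [PySem.List.pyGetD, PySem.List.pyGet?, PySem.List.pyIdx?]
  | some s =>
    have : PySem.List.pyGetD garden z "" = s := by
      unfold PySem.List.pyGetD; rw [hg]; rfl
    rw [this]
    simp

-- ===== VERDICT (by name: the statement is the Claim_ definition above) =====
theorem count_flowers_spec : Claim_equal_count_flowers := by
  intro i j garden _hDom _hPre
  unfold Spec_count_flowers count_flowers count_flowers_alt
  dsimp only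
  rw [pvFlowers_eq_loopA (fun z => pvCell garden i z) _ _
        (fun z => pvAt_row_rel garden i z),
      pvFlowers_eq_loopA (fun z => pvCell garden i z) _ _
        (fun z => pvAt_row_rel garden i z),
      pvFlowers_eq_loopA (fun z => pvCell garden z j) _ _
        (fun z => pvAt_col_rel garden j z),
      pvFlowers_eq_loopA (fun z => pvCell garden z j) _ _
        (fun z => pvAt_col_rel garden j z)]
  rw [pvLoopA_shift _ (PySem.List.pyRange (i - 1) (-1) (-1)),
    pvLoopA_shift _ (PySem.List.pyRange (j + 1) ((PySem.List.pyGetD garden 0 "").toList.length : Int) 1),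
    pvLoopA_shift _ (PySem.List.pyRange (i + 1) (garden.length : Int) 1)]
  ring
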